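-- pv_equiv track=rewrite | github.com/spellsharp/RAPTOR-Q | app/backend/question_paper_generator.py | _extract_correct_answer
-- ===== SOURCE A (Python) =====
-- def _extract_correct_answer(response, options):
--     """Extract the correct answer for multiple choice questions"""
--
--     # Look for lines starting with "ANSWER:"
--     lines = response.strip().split('\n')
--     for line in lines:
--         line = line.strip()
--         if line.startswith('ANSWER:'):
--             answer_letter = line[7:].strip()
--             if answer_letter in ['A', 'B', 'C', 'D']:
--                 return answer_letter
--
--     # Default to A if no answer found
--     return 'A'
-- ===== SOURCE B (Python) =====
-- def _match_at(s, i):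
--     """Try to match ws* 'ANSWER:' ws* [A-D] ws* end-of-line starting at position i
--     (ws = space/tab/CR).  Returns the letter, or None if the pattern fails here."""
--     n = len(s)
--     j = i
--     while j < n and s[j] in ' \t\r':
--         j += 1
--     if s[j:j + 7] != 'ANSWER:':
--         return None
--     j += 7
--     while j < n and s[j] in ' \t\r':
--         j += 1
--     if j >= n or s[j] not in 'ABCD':
--         return None
--     c = s[j]
--     j += 1
--     while j < n and s[j] in ' \t\r':
--         j += 1
--     if j == n or s[j] == '\n':
--         return c
--     return None
--
--
-- def _extract_correct_answer(response, options):
--     """Extract the correct answer for multiple choice questions.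
--
--     Single pass over the raw response: at each line start, match the pattern
--     ws* 'ANSWER:' ws* letter ws* end-of-line; no split/strip/slicing passes."""
--     n = len(response)
--     i = 0
--     at_start = True
--     while i < n:
--         if at_start:
--             letter = _match_at(response, i)
--             if letter is not None:
--                 return letter
--         at_start = response[i] == '\n'
--         i += 1
--     return 'A'
-- ===== Notes on version B (the rewrite author's own statement) =====
-- stated objective: alternative
-- what changed: Replaces strip-whole-response/split-into-lines/per-line strip-and-slice-and-membership with a single left-to-right scan of the raw string that, at each line start, pattern-matches ws*'ANSWER:'ws*[A-D]ws*(end-of-line), building no intermediate line list or stripped copies.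
import Mathlib
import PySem

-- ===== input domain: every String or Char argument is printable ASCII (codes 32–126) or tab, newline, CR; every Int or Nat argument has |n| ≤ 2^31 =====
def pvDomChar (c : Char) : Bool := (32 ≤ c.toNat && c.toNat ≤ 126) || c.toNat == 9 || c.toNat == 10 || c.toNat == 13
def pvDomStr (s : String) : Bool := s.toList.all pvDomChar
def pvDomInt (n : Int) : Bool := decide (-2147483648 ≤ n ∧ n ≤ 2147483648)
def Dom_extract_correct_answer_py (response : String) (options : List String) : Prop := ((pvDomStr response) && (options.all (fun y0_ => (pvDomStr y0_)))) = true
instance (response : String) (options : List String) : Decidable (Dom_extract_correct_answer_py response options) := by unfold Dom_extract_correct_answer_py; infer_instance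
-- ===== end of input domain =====

-- B is an alternative single-pass anchored scan of the raw string; A splits into stripped lines.

-- ===== PORT A =====
-- the 'for line in lines' loop of A
def pvAnsLoop : List (List Char) → List Char
  | [] => ['A']
  | line :: rest =>
    let t := PySem.Chars.strip line
    if PySem.Chars.startswith t "ANSWER:".toList then
      let a := PySem.Chars.strip (PySem.Chars.slice t (some 7) none)
      if a ∈ [['A'], ['B'], ['C'], ['D']] then a else pvAnsLoop rest
    else pvAnsLoop rest

def extract_correct_answer_py (response : String) (options : List String) : String :=
  String.ofList (pvAnsLoop (PySem.Chars.splitOn (PySem.Chars.strip response.toList) "\n".toList))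

-- ===== PORT B =====
-- c in ' \t\r'
def pvWsB (c : Char) : Bool := c == ' ' || c == '\t' || c == '\r'

-- _match_at: index advancement in the Python is recursion over the string suffix here
def pvMatchAt (cs : List Char) : Option Char :=
  let cs1 := cs.dropWhile pvWsB
  if cs1.take 7 = "ANSWER:".toList then
    let cs2 := (cs1.drop 7).dropWhile pvWsB
    match cs2 with
    | [] => none
    | c :: rest =>
      if c == 'A' || c == 'B' || c == 'C' || c == 'D' then
        match rest.dropWhile pvWsB with
        | [] => some c
        | d :: _ => if d == '\n' then some c else none
      else none
  else none

-- the main while loop of B: try a match at every line start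
def pvSearch : Bool → List Char → Option Char
  | _, [] => none
  | atStart, c :: rest =>
    if atStart then
      match pvMatchAt (c :: rest) with
      | some letter => some letter
      | none => pvSearch (c == '\n') rest
    else pvSearch (c == '\n') rest

def extract_correct_answer_py_alt (response : String) (options : List String) : String :=
  match pvSearch true response.toList with
  | some c => String.ofList [c]
  | none => "A"

-- ===== PRECONDITION & SPEC =====
def Spec_extract_correct_answer_py (response : String) (options : List String) (out : String) : Prop := out = extract_correct_answer_py_alt response options
instance (response : String) (options : List String) (out : String) : Decidable (Spec_extract_correct_answer_py response options out) := by unfold Spec_extract_correct_answer_py; infer_instance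

-- ===== CLAIM (what is proved, stated in full; the proofs are below) =====
def Claim_equal_extract_correct_answer_py : Prop := ∀ (response : String) (options : List String), Dom_extract_correct_answer_py response options → Spec_extract_correct_answer_py response options (extract_correct_answer_py response options)

-- ===== LEMMAS AND PROOFS =====

def pvLines : List Char → List (List Char)
  | [] => [[]]
  | c :: rest => if c = '\n' then [] :: pvLines rest else (pvLines rest).modifyHead (c :: ·)

theorem pvLines_ne_nil (s : List Char) : pvLines s ≠ [] := by
  induction s with
  | nil => simp [pvLines]
  | cons c rest ih =>
    simp only [pvLines]
    split
    · simp
    · cases h : pvLines rest with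
      | nil => exact absurd h ih
      | cons a t => simp

theorem pvGo_eq (l : List Char) : ∀ (fuel : Nat) (cur : List Char) (acc : List (List Char)),
    l.length < fuel →
    PySem.Chars.splitOn.go ['\n'] fuel l cur acc = acc.reverse ++ (pvLines l).modifyHead (cur.reverse ++ ·) := by
  induction l with
  | nil =>
    intro fuel cur acc hf
    cases fuel with
    | zero => omega
    | succ f => simp [PySem.Chars.splitOn.go, pvLines]
  | cons c rest ih =>
    intro fuel cur acc hf
    cases fuel with
    | zero => omega
    | succ f =>
      rw [PySem.Chars.splitOn.go]
      by_cases hc : c = '\n'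
      · subst hc
        have hpre : ['\n'].isPrefixOf ('\n' :: rest) = true := by simp [List.isPrefixOf]
        rw [hpre]
        simp only [List.length_cons] at hf
        rw [if_pos rfl]
        simp only [List.length_cons, List.drop_succ_cons, List.length_nil, List.drop_zero]
        show PySem.Chars.splitOn.go [Char.ofNat 10] f rest [] (cur.reverse :: acc) = _
        rw [ih f [] (cur.reverse :: acc) (by simp at hf; omega)]
        have hid : List.modifyHead (fun x : List Char => x) (pvLines rest) = pvLines rest := by
          cases pvLines rest <;> simp
        simp [pvLines, hid]
      · have hpre : ['\n'].isPrefixOf (c :: rest) = false := by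
          simp [List.isPrefixOf]; exact fun h => (hc h.symm)
        rw [hpre]
        simp only [Bool.false_eq_true, if_false]
        rw [ih f (c :: cur) acc (by simp at hf ⊢; omega)]
        simp only [pvLines, if_neg hc]
        cases h : pvLines rest with
        | nil => simp
        | cons a t => simp

theorem pvSplitOn_eq (s : List Char) : PySem.Chars.splitOn s ['\n'] = pvLines s := by
  unfold PySem.Chars.splitOn
  rw [pvGo_eq s (s.length + 1) [] [] (by omega)]
  have hid : List.modifyHead (fun x : List Char => x) (pvLines s) = pvLines s := by
    cases pvLines s <;> simp
  simpa using hid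

def pvLineRes (l : List Char) : Option (List Char) :=
  let t := PySem.Chars.strip l
  if PySem.Chars.startswith t "ANSWER:".toList then
    let a := PySem.Chars.strip (PySem.Chars.slice t (some 7) none)
    if a ∈ [['A'], ['B'], ['C'], ['D']] then some a else none
  else none

theorem pvAnsLoop_eq (ls : List (List Char)) : pvAnsLoop ls = (ls.findSome? pvLineRes).getD ['A'] := by
  induction ls with
  | nil => simp [pvAnsLoop]
  | cons l rest ih =>
    simp only [pvAnsLoop, List.findSome?_cons, pvLineRes]
    split
    · split
      · simp
      · simpa using ih
    · simpa using ih

theorem pvSearch_false_none (l : List Char) (h : '\n' ∉ l) : pvSearch false l = none := by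
  induction l with
  | nil => rfl
  | cons c rest ih =>
    simp only [pvSearch, Bool.false_eq_true, if_false]
    have hc : (c == '\n') = false := by
      simp only [beq_eq_false_iff_ne]; exact fun hh => h (by simp [hh])
    rw [hc]
    exact ih (fun hm => h (by simp [hm]))

theorem pvSearch_skip (l r : List Char) (h : '\n' ∉ l) : pvSearch false (l ++ '\n' :: r) = pvSearch true r := by
  induction l with
  | nil => simp [pvSearch]
  | cons c rest ih =>
    simp only [List.cons_append, pvSearch, Bool.false_eq_true, if_false]
    have hc : (c == '\n') = false := by
      simp only [beq_eq_false_iff_ne]; exact fun hh => h (by simp [hh])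
    rw [hc]
    exact ih (fun hm => h (by simp [hm]))

theorem pvPat_no_ws (c : Char) (h : c ∈ "ANSWER:".toList) : pvWsB c = false ∧ c ≠ '\n' := by
  have : "ANSWER:".toList = ['A','N','S','W','E','R',':'] := by decide
  rw [this] at h
  fin_cases h <;> decide

theorem pvTake7_append_ws (t w : List Char) (hw : ∀ c ∈ w, pvWsB c = true) :
    ((t ++ w).take 7 = "ANSWER:".toList) ↔ (t.take 7 = "ANSWER:".toList) := by
  rcases (Nat.lt_or_ge t.length 7).symm with hle | hlt
  · rw [List.take_append_of_le_length hle]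
  · constructor
    · intro h
      exfalso
      rw [List.take_append] at h
      cases hwt : w.take (7 - t.length) with
      | nil =>
        rw [hwt, List.append_nil] at h
        have : (t.take 7).length = 7 := by rw [h]; decide
        simp at this; omega
      | cons d w' =>
        have hd : d ∈ "ANSWER:".toList := by
          rw [← h, hwt]; exact List.mem_append_right _ (by simp)
        have hdw : d ∈ w := by
          have := hwt ▸ (List.take_sublist (7 - t.length) w)
          exact this.mem (by simp)
        have := (pvPat_no_ws d hd).1
        rw [hw d hdw] at this; exact absurd this (by simp)
    · intro h
      have : (t.take 7).length = 7 := by rw [h]; decide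
      simp at this; omega

theorem pvTake7_append_cons (t r : List Char) (d : Char) (hd : pvWsB d = true ∨ d = '\n') :
    ((t ++ d :: r).take 7 = "ANSWER:".toList) ↔ (t.take 7 = "ANSWER:".toList) := by
  rcases (Nat.lt_or_ge t.length 7).symm with hle | hlt
  · rw [List.take_append_of_le_length hle]
  · constructor
    · intro h
      exfalso
      rw [List.take_append] at h
      have h7 : 1 ≤ 7 - t.length := by omega
      have hdm : d ∈ "ANSWER:".toList := by
        rw [← h]
        refine List.mem_append_right _ ?_
        cases hn : 7 - t.length with
        | zero => omega
        | succ k => simp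
      have := pvPat_no_ws d hdm
      rcases hd with hws | hnl
      · rw [hws] at this; simpa using this.1
      · exact this.2 hnl
    · intro h
      have : (t.take 7).length = 7 := by rw [h]; decide
      simp at this; omega

theorem pvNlTake_ne (r : List Char) : (('\n' :: r).take 7 = "ANSWER:".toList) = False := by
  have hpat : "ANSWER:".toList = ['A','N','S','W','E','R',':'] := by decide
  have hne : ('\n' : Char) ≠ 'A' := by decide
  simp [hpat, List.take_succ_cons, hne]

theorem pvNilTake_ne : (([] : List Char).take 7 = "ANSWER:".toList) = False := by
  simp only [List.take_nil, eq_iff_iff, iff_false]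
  decide

theorem pvMatchAt_append (l r : List Char) (h : '\n' ∉ l) :
    pvMatchAt (l ++ '\n' :: r) = pvMatchAt l := by
  have hnlws : pvWsB '\n' = false := by decide
  simp only [pvMatchAt]
  rw [List.dropWhile_append]
  cases hu : l.dropWhile pvWsB with
  | nil =>
    simp [List.dropWhile_cons, hnlws, pvNlTake_ne, pvNilTake_ne]
  | cons a u' =>
    simp only [List.isEmpty_cons, Bool.false_eq_true, if_false]
    have hsub : ∀ x ∈ a :: u', x ∈ l := by
      intro x hx
      exact (List.dropWhile_sublist pvWsB).mem (hu ▸ hx)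
    by_cases hc : (a :: u').take 7 = "ANSWER:".toList
    · have hc' : ((a :: u') ++ '\n' :: r).take 7 = "ANSWER:".toList := by
        rw [pvTake7_append_cons _ _ _ (Or.inr rfl)]; exact hc
      rw [if_pos hc', if_pos hc]
      have hlen : 7 ≤ (a :: u').length := by
        have h1 : ((a :: u').take 7).length = 7 := by rw [hc]; decide
        rw [List.length_take] at h1; omega
      rw [List.drop_append_of_le_length hlen, List.dropWhile_append]
      cases hv : (a :: u').drop 7 |>.dropWhile pvWsB with
      | nil =>
        have hh : ('\n' == 'A' || '\n' == 'B' || '\n' == 'C' || '\n' == 'D') = false := by decide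
        simp [List.dropWhile_cons, hnlws, hh]
      | cons c r'' =>
        simp only [List.isEmpty_cons, Bool.false_eq_true, if_false, List.cons_append]
        by_cases hlet : (c == 'A' || c == 'B' || c == 'C' || c == 'D') = true
        · rw [if_pos hlet, if_pos hlet]
          rw [List.dropWhile_append]
          cases hw2 : r''.dropWhile pvWsB with
          | nil =>
            simp [List.dropWhile_cons, hnlws]
          | cons e t2 =>
            simp only [List.isEmpty_cons, Bool.false_eq_true, if_false, List.cons_append]
        · rw [if_neg hlet, if_neg hlet]
    · have hc' : ¬(((a :: u') ++ '\n' :: r).take 7 = "ANSWER:".toList) := by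
        rw [pvTake7_append_cons _ _ _ (Or.inr rfl)]; exact hc
      rw [if_neg hc', if_neg hc]

theorem pvMatchAt_snoc_ws (l : List Char) (c : Char) (hc : pvWsB c = true) :
    pvMatchAt (l ++ [c]) = pvMatchAt l := by
  simp only [pvMatchAt]
  rw [List.dropWhile_append]
  have hdc : List.dropWhile pvWsB [c] = [] := by simp [List.dropWhile_cons, hc]
  cases hu : l.dropWhile pvWsB with
  | nil =>
    simp [hdc, pvNilTake_ne]
  | cons a u' =>
    simp only [List.isEmpty_cons, Bool.false_eq_true, if_false]
    by_cases hcc : (a :: u').take 7 = "ANSWER:".toList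
    · have hc' : ((a :: u') ++ [c]).take 7 = "ANSWER:".toList := by
        rw [pvTake7_append_ws _ _ (by intro x hx; simp at hx; rw [hx]; exact hc)]; exact hcc
      rw [if_pos hc', if_pos hcc]
      have hlen : 7 ≤ (a :: u').length := by
        have h1 : ((a :: u').take 7).length = 7 := by rw [hcc]; decide
        rw [List.length_take] at h1; omega
      rw [List.drop_append_of_le_length hlen, List.dropWhile_append]
      cases hv : (a :: u').drop 7 |>.dropWhile pvWsB with
      | nil => simp [hdc]
      | cons c' r'' =>
        simp only [List.isEmpty_cons, Bool.false_eq_true, if_false, List.cons_append]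
        by_cases hlet : (c' == 'A' || c' == 'B' || c' == 'C' || c' == 'D') = true
        · rw [if_pos hlet, if_pos hlet]
          rw [List.dropWhile_append]
          cases hw2 : r''.dropWhile pvWsB with
          | nil => simp [hdc]
          | cons e t2 =>
            simp only [List.isEmpty_cons, Bool.false_eq_true, if_false, List.cons_append]
        · rw [if_neg hlet, if_neg hlet]
    · have hc' : ¬(((a :: u') ++ [c]).take 7 = "ANSWER:".toList) := by
        rw [pvTake7_append_ws _ _ (by intro x hx; simp at hx; rw [hx]; exact hc)]; exact hcc
      rw [if_neg hc', if_neg hcc]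

theorem pvMatchAt_nil : pvMatchAt [] = none := by decide

theorem pvMatchAt_nl_cons (r : List Char) : pvMatchAt ('\n' :: r) = none := by
  have hne : ¬(('\n' :: r).take 7 = "ANSWER:".toList) := by
    rw [pvNlTake_ne]; exact not_false
  simp only [pvMatchAt, List.dropWhile_cons, (by decide : pvWsB '\n' = false),
    Bool.false_eq_true, if_false]
  rw [if_neg hne]

theorem pvSearch_line (l r : List Char) (h : '\n' ∉ l) :
    pvSearch true (l ++ '\n' :: r) =
      (match pvMatchAt l with | some c => some c | none => pvSearch true r) := by
  rw [← pvMatchAt_append l r h]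
  cases l with
  | nil =>
    simp only [List.nil_append, pvMatchAt_nl_cons, pvMatchAt_nil]
    simp [pvSearch, pvMatchAt_nl_cons]
  | cons a l' =>
    simp only [List.cons_append, pvSearch, if_true]
    cases hm : pvMatchAt (a :: (l' ++ '\n' :: r)) with
    | some c => simp
    | none =>
      simp only []
      have ha : (a == '\n') = false := by
        simp only [beq_eq_false_iff_ne]; exact fun hh => h (by simp [hh])
      rw [ha, pvSearch_skip l' r (fun hm2 => h (by simp [hm2]))]

theorem pvSearch_nlfree (s : List Char) (h : '\n' ∉ s) : pvSearch true s = pvMatchAt s := by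
  cases s with
  | nil => simp [pvSearch, pvMatchAt_nil]
  | cons a s' =>
    simp only [pvSearch, if_true]
    cases hm : pvMatchAt (a :: s') with
    | some c => simp
    | none =>
      simp only []
      have ha : (a == '\n') = false := by
        simp only [beq_eq_false_iff_ne]; exact fun hh => h (by simp [hh])
      rw [ha, pvSearch_false_none s' (fun hm2 => h (by simp [hm2]))]

theorem pvLines_nlfree (s : List Char) (h : '\n' ∉ s) : pvLines s = [s] := by
  induction s with
  | nil => rfl
  | cons c rest ih =>
    simp only [pvLines]
    rw [if_neg (fun hh => h (by simp [hh])), ih (fun hm => h (by simp [hm]))]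
    rfl

theorem pvLines_append (l r : List Char) (h : '\n' ∉ l) :
    pvLines (l ++ '\n' :: r) = l :: pvLines r := by
  induction l with
  | nil => simp [pvLines]
  | cons c rest ih =>
    simp only [List.cons_append, pvLines]
    rw [if_neg (fun hh => h (by simp [hh])), ih (fun hm => h (by simp [hm]))]
    rfl

def pvL (s : List Char) : Option Char := (pvLines s).findSome? pvMatchAt

theorem pvExistsSplit (s : List Char) (h : '\n' ∈ s) :
    ∃ l r, s = l ++ '\n' :: r ∧ '\n' ∉ l := by
  induction s with
  | nil => simp at h
  | cons c rest ih =>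
    by_cases hc : c = '\n'
    · exact ⟨[], rest, by simp [hc], by simp⟩
    · have hm : '\n' ∈ rest := by
        rcases List.mem_cons.mp h with h1 | h1
        · exact absurd h1.symm hc
        · exact h1
      obtain ⟨l, r, hs, hl⟩ := ih hm
      exact ⟨c :: l, r, by simp [hs], by simp [hl]; exact fun hh => hc hh.symm⟩

theorem pvSearch_eq_pvL (s : List Char) : pvSearch true s = pvL s := by
  induction hn : s.length using Nat.strong_induction_on generalizing s with
  | _ n IH =>
    by_cases h : '\n' ∈ s
    · obtain ⟨l, r, hs, hl⟩ := pvExistsSplit s h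
      subst hs
      rw [pvSearch_line l r hl]
      unfold pvL
      rw [pvLines_append l r hl]
      simp only [List.findSome?_cons]
      cases hm : pvMatchAt l with
      | some c => simp
      | none =>
        simp only []
        exact IH r.length (by subst hn; simp; omega) r rfl
    · rw [pvSearch_nlfree s h]
      unfold pvL
      rw [pvLines_nlfree s h]
      simp only [List.findSome?_cons]
      cases pvMatchAt s <;> simp

theorem pvLines_mem_sub (s : List Char) (l : List Char) (hl : l ∈ pvLines s) :
    ∀ x ∈ l, x ∈ s := by
  induction s generalizing l with
  | nil =>
    simp [pvLines] at hl
    subst hl; simp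
  | cons c rest ih =>
    simp only [pvLines] at hl
    intro x hx
    by_cases hc : c = '\n'
    · rw [if_pos hc] at hl
      rcases List.mem_cons.mp hl with h1 | h1
      · subst h1; simp at hx
      · exact List.mem_cons_of_mem _ (ih l h1 x hx)
    · rw [if_neg hc] at hl
      cases hpl : pvLines rest with
      | nil => exact absurd hpl (pvLines_ne_nil rest)
      | cons a t =>
        rw [hpl] at hl
        simp only [List.modifyHead] at hl
        rcases List.mem_cons.mp hl with h1 | h1
        · subst h1
          rcases List.mem_cons.mp hx with h2 | h2
          · simp [h2]
          · exact List.mem_cons_of_mem _ (ih a (by rw [hpl]; simp) x h2)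
        · exact List.mem_cons_of_mem _ (ih l (by rw [hpl]; simp [h1]) x hx)

theorem pvLines_mem_nlfree (s : List Char) (l : List Char) (hl : l ∈ pvLines s) : '\n' ∉ l := by
  induction s generalizing l with
  | nil => simp [pvLines] at hl; subst hl; simp
  | cons c rest ih =>
    simp only [pvLines] at hl
    by_cases hc : c = '\n'
    · rw [if_pos hc] at hl
      rcases List.mem_cons.mp hl with h1 | h1
      · subst h1; simp
      · exact ih l h1
    · rw [if_neg hc] at hl
      cases hpl : pvLines rest with
      | nil => exact absurd hpl (pvLines_ne_nil rest)
      | cons a t =>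
        rw [hpl] at hl
        simp only [List.modifyHead] at hl
        rcases List.mem_cons.mp hl with h1 | h1
        · subst h1
          intro hx
          rcases List.mem_cons.mp hx with h2 | h2
          · exact hc h2.symm
          · exact ih a (by rw [hpl]; simp) h2
        · exact ih l (by rw [hpl]; simp [h1])

theorem pvCharEqNat (c d : Char) : (c == d) = (c.toNat == d.toNat) := by
  rcases Bool.eq_false_or_eq_true (c == d) with h | h <;> rw [h]
  · rw [beq_iff_eq] at h; subst h; simp
  · symm
    rw [beq_eq_false_iff_ne] at h
    rw [Bool.eq_false_iff, ne_eq, beq_iff_eq]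
    intro hn
    exact h (by
      have h1 := Char.ofNat_toNat c
      have h2 := Char.ofNat_toNat d
      rw [← h1, ← h2, hn])


theorem pvChar_ne_toNat (c d : Char) (h : c ≠ d) : c.toNat ≠ d.toNat := by
  intro hn
  exact h (by
    have h1 := Char.ofNat_toNat c
    have h2 := Char.ofNat_toNat d
    rw [← h1, ← h2, hn])

theorem pvWsB_toNat (c : Char) : pvWsB c = (c.toNat == 32 || c.toNat == 9 || c.toNat == 13) := by
  unfold pvWsB
  rw [pvCharEqNat c ' ', pvCharEqNat c '\t', pvCharEqNat c '\r']
  rw [(by decide : (' ' : Char).toNat = 32), (by decide : ('\t' : Char).toNat = 9),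
    (by decide : ('\r' : Char).toNat = 13)]

theorem pvIsspace_eq (c : Char) (h : pvDomChar c = true) (h2 : c ≠ '\n') :
    PySem.Chars.isspace c = pvWsB c := by
  have h10 : c.toNat ≠ 10 := pvChar_ne_toNat c '\n' h2
  rw [pvWsB_toNat]
  simp only [pvDomChar, Bool.or_eq_true, Bool.and_eq_true, beq_iff_eq, decide_eq_true_eq] at h
  rw [Bool.eq_iff_iff]
  simp only [PySem.Chars.isspace, Bool.or_eq_true, Bool.and_eq_true, beq_iff_eq, decide_eq_true_eq]
  omega

theorem pvSpaceDom (c : Char) (h : pvDomChar c = true) (hs : PySem.Chars.isspace c = true) :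
    c = '\n' ∨ pvWsB c = true := by
  by_cases hnl : c = '\n'
  · exact Or.inl hnl
  · right
    rw [← pvIsspace_eq c h hnl]
    exact hs

theorem pvDropWhile_congr {α : Type} (p q : α → Bool) (l : List α) (h : ∀ x ∈ l, p x = q x) :
    l.dropWhile p = l.dropWhile q := by
  induction l with
  | nil => rfl
  | cons c rest ih =>
    simp only [List.dropWhile_cons]
    rw [h c (by simp)]
    split
    · exact ih (fun x hx => h x (by simp [hx]))
    · rfl

theorem pvFindSome_congr_map (ls : List (List Char))
    (h : ∀ l ∈ ls, pvLineRes l = (pvMatchAt l).map (fun c => [c])) :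
    ls.findSome? pvLineRes = (ls.findSome? pvMatchAt).map (fun c => [c]) := by
  induction ls with
  | nil => simp
  | cons l rest ih =>
    simp only [List.findSome?_cons]
    rw [h l (by simp)]
    cases pvMatchAt l with
    | some c => simp
    | none => simpa using ih (fun x hx => h x (by simp [hx]))

theorem pvMatchAt_cons_ws (c : Char) (h : pvWsB c = true) (s : List Char) :
    pvMatchAt (c :: s) = pvMatchAt s := by
  simp only [pvMatchAt, List.dropWhile_cons, h, if_true]

theorem pvL_cons_ws (c : Char) (s : List Char) (h : c = '\n' ∨ pvWsB c = true) :
    pvL (c :: s) = pvL s := by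
  unfold pvL
  rcases h with h | h
  · subst h
    simp [pvLines, pvMatchAt_nil]
  · have hc : c ≠ '\n' := by
      intro hh; subst hh; exact absurd h (by decide)
    simp only [pvLines, if_neg hc]
    cases hpl : pvLines s with
    | nil => exact absurd hpl (pvLines_ne_nil s)
    | cons a t =>
      simp only [List.modifyHead, List.findSome?_cons]
      rw [pvMatchAt_cons_ws c h a]

theorem pvL_ws_prefix (w s : List Char) (h : ∀ c ∈ w, c = '\n' ∨ pvWsB c = true) :
    pvL (w ++ s) = pvL s := by
  induction w with
  | nil => simp
  | cons c w' ih =>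
    rw [List.cons_append, pvL_cons_ws c _ (h c (by simp))]
    exact ih (fun x hx => h x (by simp [hx]))

def pvModifyLast (f : List Char → List Char) : List (List Char) → List (List Char)
  | [] => []
  | [x] => [f x]
  | x :: y :: t => x :: pvModifyLast f (y :: t)

theorem pvLines_snoc_nl (s : List Char) : pvLines (s ++ ['\n']) = pvLines s ++ [[]] := by
  induction s with
  | nil => simp [pvLines]
  | cons c rest ih =>
    simp only [List.cons_append, pvLines, ih]
    by_cases hc : c = '\n'
    · rw [if_pos hc, if_pos hc]; rfl
    · rw [if_neg hc, if_neg hc]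
      cases hpl : pvLines rest with
      | nil => exact absurd hpl (pvLines_ne_nil rest)
      | cons a t => simp [List.modifyHead]

theorem pvLines_snoc (s : List Char) (c : Char) (h : c ≠ '\n') :
    pvLines (s ++ [c]) = pvModifyLast (· ++ [c]) (pvLines s) := by
  induction s with
  | nil => simp [pvLines, if_neg h, pvModifyLast, List.modifyHead]
  | cons d rest ih =>
    simp only [List.cons_append, pvLines, ih]
    by_cases hd : d = '\n'
    · rw [if_pos hd, if_pos hd]
      cases hpl : pvLines rest with
      | nil => exact absurd hpl (pvLines_ne_nil rest)
      | cons a t => rfl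
    · rw [if_neg hd, if_neg hd]
      cases hpl : pvLines rest with
      | nil => exact absurd hpl (pvLines_ne_nil rest)
      | cons a t =>
        cases t with
        | nil => simp [pvModifyLast, List.modifyHead]
        | cons b t' => simp [pvModifyLast, List.modifyHead]

theorem pvFindSome_modifyLast (g : List Char → List Char) (ls : List (List Char))
    (h : ∀ l ∈ ls, pvMatchAt (g l) = pvMatchAt l) :
    (pvModifyLast g ls).findSome? pvMatchAt = ls.findSome? pvMatchAt := by
  induction ls with
  | nil => rfl
  | cons a t ih =>
    cases t with
    | nil =>
      simp only [pvModifyLast, List.findSome?_cons]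
      rw [h a (by simp)]
    | cons b t' =>
      simp only [pvModifyLast, List.findSome?_cons]
      cases pvMatchAt a with
      | some c => simp
      | none =>
        simp only []
        have := ih (fun x hx => h x (by simp at hx ⊢; tauto))
        simpa [pvModifyLast, List.findSome?_cons] using this

theorem pvL_snoc_ws (s : List Char) (c : Char) (h : c = '\n' ∨ pvWsB c = true) :
    pvL (s ++ [c]) = pvL s := by
  unfold pvL
  rcases h with h | h
  · subst h
    rw [pvLines_snoc_nl]
    rw [List.findSome?_append]
    simp [pvMatchAt_nil]
  · have hc : c ≠ '\n' := by intro hh; subst hh; exact absurd h (by decide)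
    rw [pvLines_snoc s c hc]
    exact pvFindSome_modifyLast _ _ (fun l _ => pvMatchAt_snoc_ws l c h)

theorem pvL_ws_suffix (w s : List Char) (h : ∀ c ∈ w, c = '\n' ∨ pvWsB c = true) :
    pvL (s ++ w) = pvL s := by
  induction w generalizing s with
  | nil => simp
  | cons c w' ih =>
    have : s ++ c :: w' = (s ++ [c]) ++ w' := by simp
    rw [this, ih (s ++ [c]) (fun x hx => h x (by simp [hx])), pvL_snoc_ws s c (h c (by simp))]

theorem pvL_strip (s : List Char) (hdom : ∀ c ∈ s, pvDomChar c = true) :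
    pvL (PySem.Chars.strip s) = pvL s := by
  unfold PySem.Chars.strip PySem.Chars.lstrip PySem.Chars.rstrip
  set u := s.dropWhile PySem.Chars.isspace with hu
  have hstep1 : pvL s = pvL u := by
    conv_lhs => rw [← List.takeWhile_append_dropWhile (p := PySem.Chars.isspace) (l := s)]
    rw [pvL_ws_prefix]
    intro c hc
    exact pvSpaceDom c (hdom c ((List.takeWhile_sublist _).mem hc)) (List.mem_takeWhile_imp hc)
  have hsubu : ∀ c ∈ u, c ∈ s := fun c hc => (List.dropWhile_sublist _).mem hc
  have hstep2 : pvL u = pvL ((u.reverse.dropWhile PySem.Chars.isspace).reverse) := by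
    conv_lhs => rw [(by
      conv_lhs => rw [← List.reverse_reverse u,
        ← List.takeWhile_append_dropWhile (p := PySem.Chars.isspace) (l := u.reverse)]
      rw [List.reverse_append]
      : u = (u.reverse.dropWhile PySem.Chars.isspace).reverse ++ (u.reverse.takeWhile PySem.Chars.isspace).reverse)]
    rw [pvL_ws_suffix]
    intro c hc
    rw [List.mem_reverse] at hc
    have hcs : c ∈ s := hsubu c (by
      have := (List.takeWhile_sublist (l := u.reverse) PySem.Chars.isspace).mem hc
      rwa [List.mem_reverse] at this)
    exact pvSpaceDom c (hdom c hcs) (List.mem_takeWhile_imp hc)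
  rw [hstep1, hstep2]

theorem pvRstripW_noop (x : List Char) (hx : ∀ (h : x ≠ []), pvWsB (x.getLast h) = false) :
    (x.reverse.dropWhile pvWsB).reverse = x := by
  cases hxe : x.reverse with
  | nil =>
    have : x = [] := by simpa using congrArg List.reverse hxe
    simp [this]
  | cons a r =>
    have hxne : x ≠ [] := by
      intro hh; rw [hh] at hxe; simp at hxe
    have ha : a = x.getLast hxne := by
      have h1 : x.getLast? = some a := by
        rw [List.getLast?_eq_head?_reverse, hxe]; rfl
      rw [List.getLast?_eq_some_getLast hxne] at h1
      exact (Option.some_inj.mp h1).symm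
    have hwa : pvWsB a = false := by rw [ha]; exact hx hxne
    have hdw : List.dropWhile pvWsB (a :: r) = a :: r := by
      rw [List.dropWhile_cons, hwa]; simp
    rw [hdw, ← hxe, List.reverse_reverse]

theorem pvSuffix_getLast (x y : List Char) (h : x <:+ y) (hx : x ≠ []) (hy : y ≠ []) :
    x.getLast hx = y.getLast hy := by
  obtain ⟨p, rfl⟩ := h
  exact (List.getLast_append_of_ne_nil hy hx).symm

theorem pvDropWhile_head_false (p : Char → Bool) (l : List Char) (a : Char) (r : List Char)
    (h : l.dropWhile p = a :: r) : p a = false := by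
  induction l with
  | nil => simp at h
  | cons c rest ih =>
    rw [List.dropWhile_cons] at h
    by_cases hc : p c = true
    · rw [if_pos hc] at h; exact ih h
    · rw [if_neg hc] at h
      cases h; simpa using hc

theorem pvLineRes_eq (l : List Char) (hdom : ∀ c ∈ l, pvDomChar c = true) (hnl : '\n' ∉ l) :
    pvLineRes l = (pvMatchAt l).map (fun c => [c]) := by
  have hmem : ∀ c ∈ l, PySem.Chars.isspace c = pvWsB c := fun c hc =>
    pvIsspace_eq c (hdom c hc) (fun hh => hnl (hh ▸ hc))
  have hu : l.dropWhile PySem.Chars.isspace = l.dropWhile pvWsB := pvDropWhile_congr _ _ l hmem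
  have humem : ∀ c ∈ l.dropWhile pvWsB, c ∈ l := fun c hc => (List.dropWhile_sublist _).mem hc
  have hwws : ∀ c ∈ ((l.dropWhile pvWsB).reverse.takeWhile pvWsB).reverse, pvWsB c = true := by
    intro c hc; rw [List.mem_reverse] at hc; exact List.mem_takeWhile_imp hc
  have htmem : ∀ c ∈ ((l.dropWhile pvWsB).reverse.dropWhile pvWsB).reverse, c ∈ l := by
    intro c hc
    rw [List.mem_reverse] at hc
    exact humem c (List.mem_reverse.mp ((List.dropWhile_sublist _).mem hc))
  have htlast : ∀ (h : ((l.dropWhile pvWsB).reverse.dropWhile pvWsB).reverse ≠ []),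
      pvWsB ((((l.dropWhile pvWsB).reverse.dropWhile pvWsB).reverse).getLast h) = false := by
    intro h
    have hdne : (l.dropWhile pvWsB).reverse.dropWhile pvWsB ≠ [] := by
      intro hh; rw [hh] at h; simp at h
    obtain ⟨a, r, hd⟩ := List.exists_cons_of_ne_nil hdne
    have hpa := pvDropWhile_head_false _ _ _ _ hd
    have h1 : (((l.dropWhile pvWsB).reverse.dropWhile pvWsB).reverse).getLast? = some a := by
      rw [List.getLast?_eq_head?_reverse, List.reverse_reverse, hd]; rfl
    rw [List.getLast?_eq_some_getLast h] at h1
    rw [Option.some_inj.mp h1]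
    exact hpa
  have hstrip : PySem.Chars.strip l = ((l.dropWhile pvWsB).reverse.dropWhile pvWsB).reverse := by
    unfold PySem.Chars.strip PySem.Chars.lstrip PySem.Chars.rstrip
    rw [hu]
    have h2 : (l.dropWhile pvWsB).reverse.dropWhile PySem.Chars.isspace
        = (l.dropWhile pvWsB).reverse.dropWhile pvWsB :=
      pvDropWhile_congr _ _ _ (fun c hc => hmem c (humem c (List.mem_reverse.mp hc)))
    rw [h2]
  have huw : l.dropWhile pvWsB
      = ((l.dropWhile pvWsB).reverse.dropWhile pvWsB).reverse
        ++ ((l.dropWhile pvWsB).reverse.takeWhile pvWsB).reverse := by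
    conv_lhs => rw [← List.reverse_reverse (l.dropWhile pvWsB)]
    rw [← List.reverse_append, List.takeWhile_append_dropWhile]
  have hsw : ∀ x : List Char, (PySem.Chars.startswith x "ANSWER:".toList = true)
      ↔ (x.take 7 = "ANSWER:".toList) := by
    intro x
    unfold PySem.Chars.startswith
    rw [List.isPrefixOf_iff_prefix, List.prefix_iff_eq_take]
    rw [(by decide : ("ANSWER:".toList).length = 7)]
    exact eq_comm
  set t := ((l.dropWhile pvWsB).reverse.dropWhile pvWsB).reverse with hT
  set w := ((l.dropWhile pvWsB).reverse.takeWhile pvWsB).reverse with hW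
  simp only [pvLineRes, pvMatchAt]
  rw [hstrip, huw]
  by_cases hP : t.take 7 = "ANSWER:".toList
  · rw [if_pos ((hsw t).mpr hP), if_pos ((pvTake7_append_ws t w hwws).mpr hP)]
    have hlen7 : 7 ≤ t.length := by
      have h1 : (t.take 7).length = 7 := by rw [hP]; decide
      rw [List.length_take] at h1; omega
    have hslice : PySem.Chars.slice t (some 7) none = t.drop 7 := by
      rw [PySem.Chars.slice_eq_listSlice, PySem.List.slice_from t (by norm_num : (0:Int) ≤ 7)]
      rfl
    rw [hslice, List.drop_append_of_le_length hlen7, List.dropWhile_append]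
    have hvmemL : ∀ c ∈ (t.drop 7).dropWhile pvWsB, c ∈ l := fun c hc =>
      htmem c ((List.drop_sublist 7 t).mem ((List.dropWhile_sublist _).mem hc))
    have hvlast : ∀ a, ((t.drop 7).dropWhile pvWsB).getLast? = some a → pvWsB a = false := by
      intro a ha
      have hne : (t.drop 7).dropWhile pvWsB ≠ [] := by
        intro hh; rw [hh] at ha; simp at ha
      have hsuf : (t.drop 7).dropWhile pvWsB <:+ t :=
        (List.dropWhile_suffix _).trans (List.drop_suffix 7 t)
      have htne : t ≠ [] := by
        intro hh; rw [hh] at hsuf hne; exact hne (List.suffix_nil.mp hsuf)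
      rw [List.getLast?_eq_some_getLast hne] at ha
      have h2 := htlast htne
      rw [pvSuffix_getLast _ t hsuf hne htne] at ha
      rw [← Option.some_inj.mp ha]
      exact h2
    have hstr2 : PySem.Chars.strip (t.drop 7) = (t.drop 7).dropWhile pvWsB := by
      unfold PySem.Chars.strip PySem.Chars.lstrip PySem.Chars.rstrip
      have hc1 : (t.drop 7).dropWhile PySem.Chars.isspace = (t.drop 7).dropWhile pvWsB :=
        pvDropWhile_congr _ _ _ (fun c hc => hmem c (htmem c ((List.drop_sublist 7 t).mem hc)))
      rw [hc1]
      have hc2 : ((t.drop 7).dropWhile pvWsB).reverse.dropWhile PySem.Chars.isspace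
          = ((t.drop 7).dropWhile pvWsB).reverse.dropWhile pvWsB :=
        pvDropWhile_congr _ _ _ (fun c hc => hmem c (hvmemL c (List.mem_reverse.mp hc)))
      rw [hc2]
      refine pvRstripW_noop _ ?_
      intro h
      exact hvlast _ (List.getLast?_eq_some_getLast h)
    rw [hstr2]
    have hwnil : w.dropWhile pvWsB = [] := List.dropWhile_eq_nil_iff.mpr hwws
    rcases hv : (t.drop 7).dropWhile pvWsB with _ | ⟨c, r'⟩
    · simp [hwnil]
    · simp only [List.isEmpty_cons, Bool.false_eq_true, if_false, List.cons_append]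
      by_cases hlet : (c == 'A' || c == 'B' || c == 'C' || c == 'D') = true
      · rw [if_pos hlet, List.dropWhile_append]
        rcases hr' : r'.dropWhile pvWsB with _ | ⟨e, t2⟩
        · have hr'nil : r' = [] := by
            by_contra hne
            have hallws := List.dropWhile_eq_nil_iff.mp hr'
            have hlastr : pvWsB (r'.getLast hne) = true := hallws _ (List.getLast_mem hne)
            have hgl : ((t.drop 7).dropWhile pvWsB).getLast? = some (r'.getLast hne) := by
              rw [hv, List.getLast?_cons, List.getLast?_eq_some_getLast hne]
              rfl
            rw [hvlast _ hgl] at hlastr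
            exact absurd hlastr (by simp)
          subst hr'nil
          have hcl : ((c = 'A' ∨ c = 'B') ∨ c = 'C') ∨ c = 'D' := by
            simpa using hlet
          have hmemb : [c] ∈ [['A'], ['B'], ['C'], ['D']] := by
            rcases hcl with ((h | h) | h) | h <;> simp [h]
          rw [if_pos hmemb]
          simp [hwnil]
        · have hr'ne : r' ≠ [] := by
            intro hh; rw [hh] at hr'; simp at hr'
          have hnm : ¬(c :: r' ∈ [['A'], ['B'], ['C'], ['D']]) := by
            intro hm
            simp only [List.mem_cons, List.mem_singleton, List.not_mem_nil, or_false] at hm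
            rcases hm with h | h | h | h <;>
              · injection h with h1 h2
                exact hr'ne h2
          rw [if_neg hnm]
          have he : (e == '\n') = false := by
            have h1 : e ∈ r'.dropWhile pvWsB := by rw [hr']; simp
            have h2 : e ∈ r' := (List.dropWhile_sublist _).mem h1
            have h3 : e ∈ l := hvmemL e (by rw [hv]; simp [h2])
            simp only [beq_eq_false_iff_ne]
            exact fun hh => hnl (hh ▸ h3)
          simp [he]
      · rw [if_neg hlet]
        have hnm : ¬(c :: r' ∈ [['A'], ['B'], ['C'], ['D']]) := by
          intro hm
          simp only [List.mem_cons, List.mem_singleton, List.not_mem_nil, or_false] at hm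
          apply hlet
          rcases hm with h | h | h | h <;> (injection h with h1 _; simp [h1])
        rw [if_neg hnm]
        rfl
  · rw [if_neg (fun hh => hP ((hsw t).mp hh)),
      if_neg (fun hh => hP ((pvTake7_append_ws t w hwws).mp hh))]
    rfl

theorem pvStrip_mem (s : List Char) : ∀ c ∈ PySem.Chars.strip s, c ∈ s := by
  intro c hc
  unfold PySem.Chars.strip PySem.Chars.rstrip PySem.Chars.lstrip at hc
  rw [List.mem_reverse] at hc
  have h1 := (List.dropWhile_sublist PySem.Chars.isspace).mem hc
  rw [List.mem_reverse] at h1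
  exact (List.dropWhile_sublist PySem.Chars.isspace).mem h1

theorem pvMain (response : String) (options : List String)
    (hdom : ∀ c ∈ response.toList, pvDomChar c = true) :
    extract_correct_answer_py response options = extract_correct_answer_py_alt response options := by
  unfold extract_correct_answer_py extract_correct_answer_py_alt
  rw [(by decide : "\n".toList = ['\n']), pvSplitOn_eq, pvAnsLoop_eq]
  rw [pvFindSome_congr_map _ (fun ln hl =>
    pvLineRes_eq ln
      (fun c hc => hdom c (pvStrip_mem _ c (pvLines_mem_sub _ ln hl c hc)))
      (pvLines_mem_nlfree _ ln hl))]
  have hL : (pvLines (PySem.Chars.strip response.toList)).findSome? pvMatchAt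
      = pvSearch true response.toList := by
    rw [show (pvLines (PySem.Chars.strip response.toList)).findSome? pvMatchAt
        = pvL (PySem.Chars.strip response.toList) from rfl]
    rw [pvL_strip response.toList hdom, ← pvSearch_eq_pvL]
  rw [hL]
  cases pvSearch true response.toList with
  | some c => simp
  | none => simp

-- ===== VERDICT (by name: the statement is the Claim_ definition above) =====
theorem extract_correct_answer_py_spec : Claim_equal_extract_correct_answer_py := by
  intro response options hdom
  unfold Spec_extract_correct_answer_py
  have hdom' : ∀ c ∈ response.toList, pvDomChar c = true := by
    unfold Dom_extract_correct_answer_py at hdom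
    simp only [Bool.and_eq_true] at hdom
    have h1 := hdom.1
    unfold pvDomStr at h1
    simpa [List.all_eq_true] using h1
  exact pvMain response options hdom'
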